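-- pv_equiv track=rewrite | github.com/recinall/mhci_binding_predictor | gui.py | generate_all_variants
-- ===== SOURCE A (Python) =====
-- from typing import List, Dict, Set, Optional
--
-- def tokenize_pattern(pattern: str) -> List[List[str]]:
--     tokens = []
--     i = 0
--     while i < len(pattern):
--         if pattern[i] == '[':
--             close_idx = pattern.find(']', i + 1)
--             if close_idx == -1:
--                 tokens.append([pattern[i]])
--                 i += 1
--             else:
--                 options = list(pattern[i + 1:close_idx])
--                 tokens.append(options)
--                 i = close_idx + 1
--         else:
--             tokens.append([pattern[i]])
--             i += 1
--     return tokens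
--
-- def generate_variants_for_length(tokens: List[List[str]], length: int) -> Set[str]:
--     variants = set()
--     n = len(tokens)
--     if n < length:
--         return variants
--
--     for start in range(n - length + 1):
--         sequence = tokens[start:start + length]
--
--         def generate_combinations(current: str, index: int):
--             if index == len(sequence):
--                 variants.add(current)
--                 return
--             for option in sequence[index]:
--                 generate_combinations(current + option, index + 1)
--
--         generate_combinations('', 0)
--
--     return variants
--
-- def generate_all_variants(patterns: List[str], lengths: List[int]) -> List[str]:
--     all_variants = set()
--     for pattern in patterns:
--         tokens = tokenize_pattern(pattern)
--         for length in lengths: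
--             variants = generate_variants_for_length(tokens, length)
--             all_variants.update(variants)
--     return sorted(list(all_variants))
-- ===== SOURCE B (Python) =====
-- from itertools import product
-- from typing import List
--
--
-- def tokenize_pattern_state(pattern: str) -> List[List[str]]:
--     # single-pass state machine: buf is None outside brackets, a list of options inside
--     tokens = []
--     buf = None
--     for ch in pattern:
--         if buf is None:
--             if ch == '[':
--                 buf = []
--             else:
--                 tokens.append([ch])
--         elif ch == ']':
--             tokens.append(buf)
--             buf = None
--         else:
--             buf.append(ch)
--     if buf is not None:
--         # unclosed '[': it and everything after it are literal characters
--         tokens.append(['['])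
--         tokens.extend([c] for c in buf)
--     return tokens
--
--
-- def generate_all_variants(patterns: List[str], lengths: List[int]) -> List[str]:
--     variants = set()
--     for pattern in patterns:
--         tokens = tokenize_pattern_state(pattern)
--         n = len(tokens)
--         for length in lengths:
--             for start in range(n - length + 1):
--                 for combo in product(*tokens[start:start + length]):
--                     variants.add(''.join(combo))
--     return sorted(variants)
-- ===== Notes on version B (the rewrite author's own statement) =====
-- stated objective: idiomatic
-- what changed: The per-window DFS recursion with an inner closure is replaced by an iterative itertools.product enumeration of each window, and the find-and-jump tokenizer by a one-pass state machine; the redundant n<length guard and the per-(pattern,length) intermediate sets are dropped.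
import Mathlib
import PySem

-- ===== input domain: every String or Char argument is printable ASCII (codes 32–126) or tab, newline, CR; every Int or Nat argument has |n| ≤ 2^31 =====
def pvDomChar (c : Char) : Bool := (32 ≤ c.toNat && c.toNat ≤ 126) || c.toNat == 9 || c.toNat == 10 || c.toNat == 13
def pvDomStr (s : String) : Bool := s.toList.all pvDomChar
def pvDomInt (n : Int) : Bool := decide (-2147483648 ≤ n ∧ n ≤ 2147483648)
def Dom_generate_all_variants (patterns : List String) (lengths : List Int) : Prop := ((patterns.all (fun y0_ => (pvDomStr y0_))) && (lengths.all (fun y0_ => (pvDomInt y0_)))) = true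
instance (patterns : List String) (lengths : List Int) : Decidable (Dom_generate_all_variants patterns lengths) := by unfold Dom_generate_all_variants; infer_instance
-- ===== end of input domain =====

-- B replaces A's per-window DFS recursion by an iterative Cartesian-product enumeration
-- (itertools.product) and A's find-based tokenizer by a one-pass state machine (objective: idiomatic).

-- ===== PORT A =====

-- tokenize_pattern: while loop over i; on '[' it does pattern.find(']', i+1)
-- (ported as index? on the remaining suffix: find from i+1 = first ']' in the suffix) and
-- jumps past the bracket; options are the chars between the brackets.
def tokenizeA : List Char → List (List Char)
  | [] => []
  | c :: rest =>
    if c = '[' then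
      match PySem.List.index? rest ']' with
      | none => [c] :: tokenizeA rest
      | some j => rest.take j :: tokenizeA (rest.drop (j + 1))
    else [c] :: tokenizeA rest
termination_by cs => cs.length
decreasing_by
  · simp
  · simp [List.length_drop]
  · simp

-- generate_combinations: DFS recursion over the window, current string threaded as List Char,
-- adding the finished string to the set at the base case.
def genCombA : List (List Char) → List Char → PySem.Set String → PySem.Set String
  | [], cur, v => PySem.Set.add v (String.ofList cur)
  | opts :: restSeq, cur, v => opts.foldl (fun v o => genCombA restSeq (cur ++ [o]) v) v

-- generate_variants_for_length: early return for n < length, else loop over window starts.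
def genVariantsA (tokens : List (List Char)) (length : Int) : PySem.Set String :=
  let n : Int := (tokens.length : Int)
  if n < length then PySem.Set.empty
  else
    (PySem.List.pyRange 0 (n - length + 1) 1).foldl
      (fun v start =>
        genCombA (PySem.List.slice tokens (some start) (some (start + length))) [] v)
      PySem.Set.empty

def generate_all_variants (patterns : List String) (lengths : List Int) : List String :=
  let all :=
    patterns.foldl
      (fun all pattern =>
        let tokens := tokenizeA pattern.toList
        lengths.foldl
          (fun all length => PySem.Set.update all (genVariantsA tokens length)) all)
      PySem.Set.empty
  PySem.List.sorted all (fun x => x) false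

-- ===== PORT B =====

-- one-pass state machine: second argument none = outside brackets, some buf = options collected
-- since the last unmatched '['; at end-of-input an open bracket flushes as literal characters.
def tokB : List Char → Option (List Char) → List (List Char)
  | [], none => []
  | [], some buf => ['['] :: buf.map (fun c => [c])
  | ch :: rest, none =>
      if ch = '[' then tokB rest (some []) else [ch] :: tokB rest none
  | ch :: rest, some buf =>
      if ch = ']' then buf :: tokB rest none else tokB rest (some (buf ++ [ch]))

-- itertools.product(*window), each combo joined: leftmost option varies slowest.
def prodB : List (List Char) → List (List Char)
  | [] => [[]]
  | opts :: rest => opts.flatMap (fun o => (prodB rest).map (fun t => o :: t))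

def generate_all_variants_alt (patterns : List String) (lengths : List Int) : List String :=
  PySem.List.sorted
    (patterns.foldl
      (fun s pattern =>
        let tokens := tokB pattern.toList none
        let n : Int := (tokens.length : Int)
        lengths.foldl
          (fun s length =>
            (PySem.List.pyRange 0 (n - length + 1) 1).foldl
              (fun s start =>
                (prodB (PySem.List.slice tokens (some start) (some (start + length)))).foldl
                  (fun s t => PySem.Set.add s (String.ofList t)) s)
              s)
          s)
      PySem.Set.empty)
    (fun x => x) false

-- ===== PRECONDITION & SPEC =====
def Spec_generate_all_variants (patterns : List String) (lengths : List Int) (out : List String) : Prop := out = generate_all_variants_alt patterns lengths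
instance (patterns : List String) (lengths : List Int) (out : List String) : Decidable (Spec_generate_all_variants patterns lengths out) := by unfold Spec_generate_all_variants; infer_instance

-- ===== CLAIM (what is proved, stated in full; the proofs are below) =====
def Claim_equal_generate_all_variants : Prop := ∀ (patterns : List String) (lengths : List Int), Dom_generate_all_variants patterns lengths → Spec_generate_all_variants patterns lengths (generate_all_variants patterns lengths)

-- ===== LEMMAS AND PROOFS =====

-- all characters are literal tokens when the suffix has no ']'
theorem tokenizeA_no_close (cs : List Char) (h : ']' ∉ cs) :
    tokenizeA cs = cs.map (fun c => [c]) := by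
  induction cs with
  | nil => simp [tokenizeA]
  | cons c rest ih =>
    have hr : ']' ∉ rest := fun hm => h (List.mem_cons_of_mem _ hm)
    have hidx : PySem.List.index? rest ']' = none :=
      (PySem.List.index?_eq_none_iff rest ']').mpr hr
    simp only [PySem.List.index?_eq_idxOf?] at hidx
    by_cases hc : c = '['
    · simp [tokenizeA, hc, hidx, ih hr]
    · simp [tokenizeA, hc, ih hr]

-- the buffered state of the machine scans for the first ']' in the rest of the input
theorem tokB_some (cs : List Char) (buf : List Char) :
    tokB cs (some buf) =
      match PySem.List.index? cs ']' with
      | none => ['['] :: (buf ++ cs).map (fun c => [c])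
      | some j => (buf ++ cs.take j) :: tokB (cs.drop (j + 1)) none := by
  induction cs generalizing buf with
  | nil => simp [tokB, PySem.List.index?]
  | cons ch rest ih =>
    by_cases hc : ch = ']'
    · subst hc
      have h0 : PySem.List.index? (']' :: rest) ']' = some 0 :=
        PySem.List.index?_cons_self (x := ']') rest
      simp only [PySem.List.index?_eq_idxOf?] at h0
      simp [tokB, h0]
    · rw [PySem.List.index?_cons_of_ne rest hc]
      have hih := ih (buf ++ [ch])
      simp only [PySem.List.index?_eq_idxOf?] at hih ⊢
      cases hidx : List.idxOf? ']' rest with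
      | none =>
        rw [hidx] at hih
        simp [tokB, hc, hih]
      | some j =>
        rw [hidx] at hih
        simp only [tokB, if_neg hc, hih, Option.map_some]
        simp [List.take_succ_cons, List.drop_succ_cons, List.append_assoc]

theorem tokB_eq_tokenizeA (cs : List Char) : tokB cs none = tokenizeA cs := by
  induction cs using tokenizeA.induct with
  | case1 => simp [tokB, tokenizeA]
  | case2 rest hidx ih =>
    have hs := tokB_some rest []
    rw [hidx] at hs
    have hnc : ']' ∉ rest := (PySem.List.index?_eq_none_iff rest ']').mp hidx
    simp only [tokB, hs, List.nil_append]
    rw [tokenizeA]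
    simp only [PySem.List.index?_eq_idxOf?] at hidx
    simp [hidx, tokenizeA_no_close rest hnc]
  | case3 rest j hidx ih =>
    have hs := tokB_some rest []
    rw [hidx] at hs
    simp only [tokB, hs, List.nil_append, ih]
    rw [tokenizeA]
    simp only [PySem.List.index?_eq_idxOf?] at hidx
    simp [hidx]
  | case4 c rest hc ih =>
    rw [tokenizeA]
    simp [tokB, hc, ih]

-- the DFS enumeration adds exactly the product list, in the same order
theorem genCombA_eq_foldl (seq : List (List Char)) (cur : List Char) (v : PySem.Set String) :
    genCombA seq cur v =
      (prodB seq).foldl (fun v t => PySem.Set.add v (String.ofList (cur ++ t))) v := by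
  induction seq generalizing cur v with
  | nil => simp [genCombA, prodB]
  | cons opts rest ih =>
    simp only [genCombA, prodB, List.foldl_flatMap, List.foldl_map]
    induction opts generalizing v with
    | nil => rfl
    | cons o os iho =>
      simp only [List.foldl_cons]
      rw [ih, iho]
      simp only [List.append_assoc, List.singleton_append]

-- updating a set with a set built from a list = updating with the list itself
theorem update_ofList (s : PySem.Set String) (L : List String) :
    PySem.Set.update s (PySem.Set.ofList L) = PySem.Set.update s L := by
  induction L using List.reverseRecOn with
  | nil => simp [PySem.Set.ofList]
  | append_singleton L x ih =>
    rw [PySem.Set.ofList_append_singleton, PySem.Set.update_append,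
        PySem.Set.update_cons, PySem.Set.update_nil]
    by_cases hx : x ∈ PySem.Set.ofList L
    · rw [PySem.Set.add_of_mem hx, ih, PySem.Set.add_of_mem]
      exact (PySem.Set.mem_update _ _ _).mpr
        (Or.inr ((PySem.Set.mem_ofList _ _).mp hx))
    · rw [PySem.Set.add_of_not_mem hx, PySem.Set.update_append, ih,
          PySem.Set.update_cons, PySem.Set.update_nil]

def windowList (tokens : List (List Char)) (length : Int) : List String :=
  (PySem.List.pyRange 0 ((tokens.length : Int) - length + 1) 1).flatMap
    (fun start =>
      (prodB (PySem.List.slice tokens (some start) (some (start + length)))).map String.ofList)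

theorem genVariantsA_eq_ofList (tokens : List (List Char)) (length : Int) :
    genVariantsA tokens length = PySem.Set.ofList (windowList tokens length) := by
  by_cases h : (tokens.length : Int) < length
  · have hnil : PySem.List.pyRange 0 ((tokens.length : Int) - length + 1) 1 = [] :=
      PySem.List.pyRange_one_eq_nil (by omega)
    simp [genVariantsA, windowList, h, hnil, PySem.Set.ofList]
  · simp only [genVariantsA, windowList, if_neg h]
    rw [PySem.Set.ofList_eq_foldl, List.foldl_flatMap]
    simp only [List.foldl_map, genCombA_eq_foldl, List.nil_append]
    rfl

-- B's two inner loops are exactly 'update the running set with this pattern/length's variants'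
theorem stepB_eq (tokens : List (List Char)) (length : Int) (s : PySem.Set String) :
    (PySem.List.pyRange 0 ((tokens.length : Int) - length + 1) 1).foldl
      (fun s start =>
        (prodB (PySem.List.slice tokens (some start) (some (start + length)))).foldl
          (fun s t => PySem.Set.add s (String.ofList t)) s) s
      = PySem.Set.update s (windowList tokens length) := by
  rw [PySem.Set.update, windowList, List.foldl_flatMap]
  simp only [List.foldl_map]

-- ===== VERDICT (by name: the statement is the Claim_ definition above) =====
theorem generate_all_variants_spec : Claim_equal_generate_all_variants := by
  intro patterns lengths _
  unfold Spec_generate_all_variants generate_all_variants generate_all_variants_alt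
  have hfun :
      (fun (all : PySem.Set String) (pattern : String) =>
        lengths.foldl
          (fun all length => PySem.Set.update all (genVariantsA (tokenizeA pattern.toList) length))
          all)
      = (fun (s : PySem.Set String) (pattern : String) =>
        lengths.foldl
          (fun s length =>
            (PySem.List.pyRange 0 (((tokB pattern.toList none).length : Int) - length + 1) 1).foldl
              (fun s start =>
                (prodB (PySem.List.slice (tokB pattern.toList none) (some start)
                  (some (start + length)))).foldl
                  (fun s t => PySem.Set.add s (String.ofList t)) s)
              s)
          s) := by
    funext all pattern
    rw [tokB_eq_tokenizeA]
    have hinner :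
        (fun (all : PySem.Set String) (length : Int) =>
          PySem.Set.update all (genVariantsA (tokenizeA pattern.toList) length))
        = (fun (s : PySem.Set String) (length : Int) =>
          (PySem.List.pyRange 0 (((tokenizeA pattern.toList).length : Int) - length + 1) 1).foldl
            (fun s start =>
              (prodB (PySem.List.slice (tokenizeA pattern.toList) (some start)
                (some (start + length)))).foldl
                (fun s t => PySem.Set.add s (String.ofList t)) s)
            s) := by
      funext s length
      rw [stepB_eq, genVariantsA_eq_ofList, update_ofList]
    rw [hinner]
  simp only [hfun]
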